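-- pv_equiv track=rewrite | github.com/CS-321-Team3/321-project | sorter.py | group_hours
-- ===== SOURCE A (Python) =====
-- def group_hours(hours):
--     hours = list(hours)
--     hours.sort()
--     time_block = []
--     #check if there is an hour list
--     if not hours:
--         return time_block
--     #create start and end
--     start = hours[0]
--     end = hours[0]
--     #check the hour in hours
--     for hour in hours[1:]:
--         #check to see if the new hour is end + 1
--         #if so, then we can make it part of this block
--         if hour == end + 1:
--             end = hour
--         else:
--            time_block.append((start, end)) #make a new block
--            start = hour
--            end = hour
--     #add in the last time block
--     time_block.append((start, end))
--     return time_block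
-- ===== SOURCE B (Python) =====
-- def group_hours(hours):
--     hs = sorted(hours)
--     n = len(hs)
--     if not hs:
--         return []
--     breaks = [i for i in range(1, n) if hs[i] != hs[i - 1] + 1]
--     return [(hs[a], hs[b - 1]) for a, b in zip([0] + breaks, breaks + [n])]
-- ===== Notes on version B (the rewrite author's own statement) =====
-- stated objective: alternative
-- what changed: A scans the sorted list with a mutable start/end accumulator, flushing a block at each break; B instead computes the list of break indices with a comprehension and zips start indices with end indices to build all blocks at once, with no loop-carried state.
import Mathlib
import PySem

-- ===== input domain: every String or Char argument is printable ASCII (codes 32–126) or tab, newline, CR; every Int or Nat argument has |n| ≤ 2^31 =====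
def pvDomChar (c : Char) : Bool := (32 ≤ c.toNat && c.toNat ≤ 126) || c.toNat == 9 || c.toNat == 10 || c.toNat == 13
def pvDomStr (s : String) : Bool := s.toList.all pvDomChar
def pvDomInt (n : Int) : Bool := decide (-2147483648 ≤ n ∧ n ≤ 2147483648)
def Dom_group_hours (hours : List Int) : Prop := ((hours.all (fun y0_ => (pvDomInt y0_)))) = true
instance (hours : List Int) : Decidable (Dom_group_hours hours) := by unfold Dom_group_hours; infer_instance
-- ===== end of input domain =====

-- B replaces A's stateful start/end accumulator loop by a break-index computation: a comprehension of
-- break positions plus a zip of starts with ends (objective: alternative decomposition, same O(n log n) cost).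


-- ===== PORT A =====
def group_hours (hours : List Int) : List (Int × Int) :=
  let hs := PySem.List.sorted hours (fun x => x) false
  match hs with
  | [] => []
  | h :: tl =>
      let r := (PySem.List.slice (h :: tl) (some 1) none).foldl
        (fun (st : List (Int × Int) × Int × Int) hour =>
          if hour = st.2.2 + 1 then (st.1, st.2.1, hour)
          else (st.1 ++ [(st.2.1, st.2.2)], hour, hour))
        ([], h, h)
      r.1 ++ [(r.2.1, r.2.2)]

-- ===== PORT B =====
-- every index fed to pyGetD is in range here (Python's hs[i] never raises), so the default 0 is never used
def group_hours_alt (hours : List Int) : List (Int × Int) :=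
  let hs := PySem.List.sorted hours (fun x => x) false
  let n : Int := hs.length
  if hs = [] then []
  else
    let breaks := (PySem.List.pyRange 1 n 1).filter
      (fun i => PySem.List.pyGetD hs i 0 != PySem.List.pyGetD hs (i - 1) 0 + 1)
    (List.zip (0 :: breaks) (breaks ++ [n])).map
      (fun p => (PySem.List.pyGetD hs p.1 0, PySem.List.pyGetD hs (p.2 - 1) 0))

-- ===== PRECONDITION & SPEC =====
def Spec_group_hours (hours : List Int) (out : List (Int × Int)) : Prop := out = group_hours_alt hours
instance (hours : List Int) (out : List (Int × Int)) : Decidable (Spec_group_hours hours out) := by unfold Spec_group_hours; infer_instance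

-- ===== CLAIM (what is proved, stated in full; the proofs are below) =====
def Claim_equal_group_hours : Prop := ∀ (hours : List Int), Dom_group_hours hours → Spec_group_hours hours (group_hours hours)

-- ===== LEMMAS AND PROOFS =====

-- the common specification: A's loop read recursively (maximal consecutive runs)
def runsFrom (s e : Int) : List Int → List (Int × Int)
  | [] => [(s, e)]
  | h :: t => if h = e + 1 then runsFrom s h t else (s, e) :: runsFrom h h t

-- break positions of a list: index-free characterization of B's comprehension
def brk : List Int → List Int
  | [] => []
  | [_] => []
  | x :: y :: t => (if y = x + 1 then ([] : List Int) else [1]) ++ (brk (y :: t)).map (· + 1)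

-- B's zip/map expression with brk substituted for the filter
def zipform (hs : List Int) : List (Int × Int) :=
  (List.zip (0 :: brk hs) (brk hs ++ [(hs.length : Int)])).map
    (fun p => (PySem.List.pyGetD hs p.1 0, PySem.List.pyGetD hs (p.2 - 1) 0))

-- end of the first run, rest after the first run, runs of the rest
def endOf (e : Int) : List Int → Int
  | [] => e
  | h :: t => if h = e + 1 then endOf h t else e

def restOf (e : Int) : List Int → List Int
  | [] => []
  | h :: t => if h = e + 1 then restOf h t else h :: t

def restRuns : List Int → List (Int × Int)
  | [] => []
  | h :: t => runsFrom h h t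

theorem pyGetD_cons_succ (l : List Int) (x : Int) (i : Int) (d : Int) (hi : 0 ≤ i) :
    PySem.List.pyGetD (x :: l) (i + 1) d = PySem.List.pyGetD l i d := by
  obtain ⟨m, rfl⟩ := Int.eq_ofNat_of_zero_le hi
  have : ((m : Int) + 1) = ((m + 1 : Nat) : Int) := by push_cast; ring
  rw [this, PySem.List.pyGetD_natCast, PySem.List.pyGetD_natCast, List.getD_cons_succ]

theorem brk_pos : ∀ (l : List Int), ∀ i ∈ brk l, 1 ≤ i := by
  intro l
  induction l with
  | nil => simp [brk]
  | cons x l ih =>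
    cases l with
    | nil => simp [brk]
    | cons y t =>
      intro i hi
      simp only [brk, List.mem_append, List.mem_ite_nil_left, List.mem_singleton, List.mem_map] at hi
      rcases hi with ⟨_, rfl⟩ | ⟨j, hj, rfl⟩
      · omega
      · have := ih j hj; omega

theorem runsFrom_eq (t : List Int) : ∀ s e : Int,
    runsFrom s e t = (s, endOf e t) :: restRuns (restOf e t) := by
  induction t with
  | nil => intro s e; simp [runsFrom, endOf, restOf, restRuns]
  | cons h t ih =>
    intro s e
    by_cases hc : h = e + 1
    · simp [runsFrom, endOf, restOf, hc, ih]
    · simp [runsFrom, endOf, restOf, restRuns, hc]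

theorem map_shift (x : Int) (l : List Int) (pr : List (Int × Int))
    (hb : ∀ p ∈ pr, 0 ≤ p.1 ∧ 1 ≤ p.2) :
    (pr.map (Prod.map (· + 1) (· + 1))).map
      (fun p => (PySem.List.pyGetD (x :: l) p.1 0, PySem.List.pyGetD (x :: l) (p.2 - 1) 0))
    = pr.map (fun p => (PySem.List.pyGetD l p.1 0, PySem.List.pyGetD l (p.2 - 1) 0)) := by
  rw [List.map_map]
  apply List.map_congr_left
  intro p hp
  obtain ⟨h1, h2⟩ := hb p hp
  obtain ⟨a, b⟩ := p
  simp only [Function.comp, Prod.map] at *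
  congr 1
  · exact pyGetD_cons_succ _ _ _ _ h1
  · have : b + 1 - 1 = (b - 1) + 1 := by ring
    rw [this, pyGetD_cons_succ _ _ _ _ (by omega)]

theorem zip_cons_shift (bs cs : List Int) :
    List.zip (1 :: bs.map (· + 1)) (cs.map (· + 1))
    = (List.zip (0 :: bs) cs).map (Prod.map (· + 1) (· + 1)) := by
  cases cs with
  | nil => simp
  | cons c cs => simp [List.zip_cons_cons, List.zip_map, Prod.map]

theorem zipform_eq (t : List Int) : ∀ x : Int, zipform (x :: t) = runsFrom x x t := by
  induction t with
  | nil =>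
    intro x
    norm_num [zipform, brk, runsFrom, PySem.List.pyGetD_zero_cons]
  | cons y t' ih =>
    intro x
    obtain ⟨c, rest, hc⟩ := List.exists_cons_of_ne_nil
      (show brk (y :: t') ++ [(((y :: t').length : Int))] ≠ [] by simp)
    have hcpos : ∀ z ∈ c :: rest, 1 ≤ z := by
      rw [← hc]
      intro z hz
      rcases List.mem_append.mp hz with h | h
      · exact brk_pos _ z h
      · simp at h; omega
    have hlen : (((x :: y :: t').length : Int)) = ((y :: t').length : Int) + 1 := by
      push_cast [List.length]; ring
    have hzl : zipform (y :: t')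
        = (PySem.List.pyGetD (y :: t') 0 0, PySem.List.pyGetD (y :: t') (c - 1) 0)
          :: (List.zip (brk (y :: t')) rest).map
              (fun p => (PySem.List.pyGetD (y :: t') p.1 0, PySem.List.pyGetD (y :: t') (p.2 - 1) 0)) := by
      simp only [zipform, hc, List.zip_cons_cons, List.map_cons]
    have hy0 : PySem.List.pyGetD (y :: t') 0 0 = y := PySem.List.pyGetD_zero_cons ..
    have e1 : PySem.List.pyGetD (x :: y :: t') 0 0 = x := PySem.List.pyGetD_zero_cons ..
    by_cases hxy : y = x + 1
    · -- continuation: first group extends to the left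
      have hbx : brk (x :: y :: t') = (brk (y :: t')).map (· + 1) := by
        simp [brk, hxy]
      have hsecond : (brk (y :: t')).map (· + 1) ++ [(((x :: y :: t').length : Int))]
          = (c + 1) :: rest.map (· + 1) := by
        rw [hlen,
          show ([((((y :: t').length : Int)) + 1)] = [(((y :: t').length : Int))].map (· + 1)) by simp,
          ← List.map_append, hc, List.map_cons]
      simp only [zipform, hbx, hsecond, List.zip_cons_cons, List.map_cons, List.zip_map]
      rw [map_shift x (y :: t') _ (by
        intro p hp
        obtain ⟨h1, h2⟩ := List.of_mem_zip hp
        have hb1 := brk_pos _ _ h1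
        have hb2 := hcpos _ (List.mem_cons_of_mem _ h2)
        exact ⟨by omega, hb2⟩)]
      have e2 : PySem.List.pyGetD (x :: y :: t') (c + 1 - 1) 0 = PySem.List.pyGetD (y :: t') (c - 1) 0 := by
        have h : c + 1 - 1 = (c - 1) + 1 := by ring
        rw [h, pyGetD_cons_succ _ _ _ _ (by have := hcpos c (List.mem_cons_self ..); omega)]
      rw [e1, e2]
      have hih := ih y
      rw [hzl, runsFrom_eq, hy0] at hih
      obtain ⟨h1, h2⟩ := List.cons_eq_cons.mp hih
      have hE := congrArg Prod.snd h1
      simp only at hE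
      rw [hE, h2]
      rw [show runsFrom x x (y :: t') = runsFrom x y t' by simp [runsFrom, hxy]]
      rw [runsFrom_eq]
    · -- break between x and y
      have hbx : brk (x :: y :: t') = 1 :: (brk (y :: t')).map (· + 1) := by
        simp [brk, hxy]
      have hsecond : (1 :: (brk (y :: t')).map (· + 1)) ++ [(((x :: y :: t').length : Int))]
          = 1 :: ((brk (y :: t') ++ [(((y :: t').length : Int))]).map (· + 1)) := by
        rw [hlen]; simp
      simp only [zipform, hbx, hsecond, List.zip_cons_cons, List.map_cons]
      rw [zip_cons_shift]
      rw [map_shift x (y :: t') _ (by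
        intro p hp
        obtain ⟨h1, h2⟩ := List.of_mem_zip hp
        constructor
        · rcases List.mem_cons.mp h1 with h | h
          · omega
          · have := brk_pos _ _ h; omega
        · rcases List.mem_append.mp h2 with h | h
          · exact brk_pos _ _ h
          · simp at h; omega)]
      have e2 : PySem.List.pyGetD (x :: y :: t') (1 - 1) 0 = x := by
        norm_num [PySem.List.pyGetD_zero_cons]
      rw [e1, e2]
      have : (List.zip (0 :: brk (y :: t')) (brk (y :: t') ++ [(((y :: t').length : Int))])).map
            (fun p => (PySem.List.pyGetD (y :: t') p.1 0, PySem.List.pyGetD (y :: t') (p.2 - 1) 0))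
          = zipform (y :: t') := rfl
      rw [this, ih y]
      simp [runsFrom, hxy]

-- A's loop equals runsFrom
theorem loopA_eq (t : List Int) : ∀ (s e : Int) (acc : List (Int × Int)),
    (let r := t.foldl
        (fun (st : List (Int × Int) × Int × Int) hour =>
          if hour = st.2.2 + 1 then (st.1, st.2.1, hour)
          else (st.1 ++ [(st.2.1, st.2.2)], hour, hour))
        (acc, s, e)
     r.1 ++ [(r.2.1, r.2.2)]) = acc ++ runsFrom s e t := by
  induction t with
  | nil => intro s e acc; simp [runsFrom]
  | cons h t ih =>
    intro s e acc
    by_cases hc : h = e + 1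
    · simp only [List.foldl_cons, hc, runsFrom]
      simpa [hc] using ih s h acc
    · simp only [List.foldl_cons, runsFrom, if_neg hc]
      rw [show (acc ++ ((s, e) :: runsFrom h h t)) = (acc ++ [(s, e)]) ++ runsFrom h h t by simp]
      exact ih h h (acc ++ [(s, e)])

theorem pyRange_shift (n : Nat) : PySem.List.pyRange 1 ((n:Int)+2) 1 = 1 :: (PySem.List.pyRange 1 ((n:Int)+1) 1).map (· + 1) := by
  rw [PySem.List.pyRange_one_cons (by omega)]
  rw [PySem.List.pyRange_one, PySem.List.pyRange_one, List.map_map]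
  congr 1
  have h1 : ((n:Int) + 2 - (1+1)).toNat = ((n:Int) + 1 - 1).toNat := by omega
  rw [h1]
  exact List.map_congr_left (fun k _ => by simp [Function.comp]; omega)

theorem filter_eq_brk : ∀ hs : List Int,
    (PySem.List.pyRange 1 (hs.length : Int) 1).filter
      (fun i => PySem.List.pyGetD hs i 0 != PySem.List.pyGetD hs (i - 1) 0 + 1) = brk hs := by
  intro hs
  induction hs with
  | nil => simp [brk, PySem.List.pyRange_one_eq_nil]
  | cons x l ih =>
    cases l with
    | nil => simp [brk, PySem.List.pyRange_one_eq_nil]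
    | cons y t =>
      have hlen : (((x :: y :: t).length : Int)) = (t.length : Int) + 2 := by push_cast [List.length]; ring
      rw [hlen, pyRange_shift, List.filter_cons, List.filter_map]
      have hrest :
          (PySem.List.pyRange 1 ((t.length : Int) + 1) 1).filter
            ((fun i => PySem.List.pyGetD (x :: y :: t) i 0 != PySem.List.pyGetD (x :: y :: t) (i - 1) 0 + 1) ∘ (· + 1))
          = (PySem.List.pyRange 1 ((t.length : Int) + 1) 1).filter
            (fun i => PySem.List.pyGetD (y :: t) i 0 != PySem.List.pyGetD (y :: t) (i - 1) 0 + 1) := by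
        apply List.filter_congr
        intro i hi
        have h1 : 1 ≤ i := (PySem.List.mem_pyRange_one.mp hi).1
        simp only [Function.comp]
        have e1 : PySem.List.pyGetD (x :: y :: t) (i + 1) 0 = PySem.List.pyGetD (y :: t) i 0 :=
          pyGetD_cons_succ _ _ _ _ (by omega)
        have e2 : PySem.List.pyGetD (x :: y :: t) (i + 1 - 1) 0 = PySem.List.pyGetD (y :: t) (i - 1) 0 := by
          have : i + 1 - 1 = (i - 1) + 1 := by ring
          rw [this, pyGetD_cons_succ _ _ _ _ (by omega)]
        rw [e1, e2]
      rw [hrest]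
      have ihl : (PySem.List.pyRange 1 ((t.length : Int) + 1) 1).filter
            (fun i => PySem.List.pyGetD (y :: t) i 0 != PySem.List.pyGetD (y :: t) (i - 1) 0 + 1) = brk (y :: t) := by
        have : (((y :: t).length : Int)) = (t.length : Int) + 1 := by push_cast [List.length]; ring
        rw [← this]; exact ih
      rw [ihl]
      have hp1 : (PySem.List.pyGetD (x :: y :: t) 1 0 != PySem.List.pyGetD (x :: y :: t) (1 - 1) 0 + 1)
          = !(y == x + 1) := by
        have e1 : PySem.List.pyGetD (x :: y :: t) 1 0 = y := by
          have : (1 : Int) = 0 + 1 := by ring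
          rw [this, pyGetD_cons_succ _ _ _ _ le_rfl, PySem.List.pyGetD_zero_cons]
        have e2 : PySem.List.pyGetD (x :: y :: t) (1 - 1) 0 = x := by
          norm_num [PySem.List.pyGetD_zero_cons]
        rw [e1, e2, bne]
      rw [hp1]
      by_cases hc : y = x + 1
      · simp [brk, hc]
      · simp [brk, hc]

-- ===== VERDICT (by name: the statement is the Claim_ definition above) =====
theorem group_hours_spec : Claim_equal_group_hours := by
  intro hours _
  unfold Spec_group_hours group_hours group_hours_alt
  cases hhs : PySem.List.sorted hours (fun x => x) false with
  | nil => simp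
  | cons h t =>
    simp only [if_neg (by simp : (h :: t) ≠ [])]
    rw [PySem.List.slice_from_one]
    rw [filter_eq_brk (h :: t)]
    have := loopA_eq t h h []
    simp only [List.nil_append] at this
    rw [List.tail_cons, this]
    exact (zipform_eq t h).symm
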